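-- pv_equiv track=rewrite | github.com/paruma/atcoder_rust | calc.py | f
-- ===== SOURCE A (Python) =====
-- mod = 998244353
--
-- def f(x: int) -> int:
--     """x を有理数に復元する"""
--     for denom in range(1, 1000):  # 分子
--         denom_inv = pow(denom, -1, mod)
--         for numer in range(-1000, 1000):  # 分母
--             if x == numer * denom_inv % mod:
--                 if denom_inv == 1:
--                     return f"{numer}"
--                 else:
--                     return f"{numer}/{denom}"
--     return "Not Found"
-- ===== SOURCE B (Python) =====
-- mod = 998244353
--
-- def f(x: int) -> int:
--     """x を有理数に復元する"""
--     # For each denominator, the unique candidate numerator is numer ≡ x*denom (mod mod);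
--     # it matches iff it lies in [-1000, 1000), tested in O(1) — no inner scan, no modular inverse.
--     if x < 0 or x >= mod:
--         return "Not Found"
--     for denom in range(1, 1000):
--         r = x * denom % mod
--         numer = r if r < 1000 else r - mod if r >= mod - 1000 else None
--         if numer is not None:
--             return f"{numer}" if denom == 1 else f"{numer}/{denom}"
--     return "Not Found"
-- ===== Notes on version B (the rewrite author's own statement) =====
-- stated objective: faster
-- what changed: Instead of scanning every candidate numerator in the window against numer times the inverse of denom mod p for each denominator, B computes the unique candidate numerator r = x*denom mod p directly and tests in constant time whether r (or r minus p) lies in the window, eliminating both the inner loop and the modular-inverse computation.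
import Mathlib
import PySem

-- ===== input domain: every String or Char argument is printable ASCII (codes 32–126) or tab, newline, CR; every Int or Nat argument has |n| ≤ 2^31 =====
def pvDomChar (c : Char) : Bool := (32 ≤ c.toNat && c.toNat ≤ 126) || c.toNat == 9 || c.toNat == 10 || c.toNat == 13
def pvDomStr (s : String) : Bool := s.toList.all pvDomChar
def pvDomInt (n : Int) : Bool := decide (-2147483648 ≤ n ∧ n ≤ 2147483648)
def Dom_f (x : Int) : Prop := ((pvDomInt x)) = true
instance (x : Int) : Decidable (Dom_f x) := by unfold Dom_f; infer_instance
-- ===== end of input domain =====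

-- B replaces A's per-denominator scan over the whole numerator window (and its modular
-- inverse) by a constant-time test whether the unique candidate x*denom mod p lies in the window.


-- ===== PORT A =====
-- module constant: mod = 998244353
def pmod : Int := 998244353

-- hand port of Python's negative-exponent modular pow, i.e. the inverse of d mod m
-- (extended Euclid, result in [0, m)); exact for
-- 1 ≤ d < m with gcd(d, m) = 1, which covers every call A makes (the fuel ≥ a only
-- makes the recursion structural; it is never exhausted there)
def egcd : Nat → Nat → Nat → Int × Int
  | 0, _, _ => (0, 1)
  | _ + 1, 0, _ => (0, 1)
  | fuel + 1, a, b =>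
      let p := egcd fuel (b % a) a
      (p.2 - ((b / a : Nat) : Int) * p.1, p.1)

def pymodinv (d m : Int) : Int := PySem.Int.mod (egcd d.toNat d.toNat m.toNat).1 m

-- inner loop: 'for numer in range(-1000, 1000): …' (returns some of the formatted string)
def fInner (x inv d : Int) : List Int → Option String
  | [] => none
  | n :: ns =>
      if x = PySem.Int.mod (n * inv) pmod then
        some (if inv = 1 then PySem.Int.toStr n
              else PySem.Int.toStr n ++ "/" ++ PySem.Int.toStr d)
      else fInner x inv d ns

-- outer loop: 'for denom in range(1, 1000): …'  (denom_inv = the inverse of denom mod p)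
def fOuter (x : Int) : List Int → String
  | [] => "Not Found"
  | d :: ds =>
      match fInner x (pymodinv d pmod) d (PySem.List.pyRange (-1000) 1000 1) with
      | some s => s
      | none => fOuter x ds

def f (x : Int) : String := fOuter x (PySem.List.pyRange 1 1000 1)

-- ===== PORT B =====
-- loop body: r = x*denom % mod;  numer = r if r < 1000 else r - mod if r >= mod - 1000 else None
def fAltLoop (x : Int) : List Int → String
  | [] => "Not Found"
  | d :: ds =>
      match (if PySem.Int.mod (x * d) pmod < 1000 then some (PySem.Int.mod (x * d) pmod)
             else if pmod - 1000 ≤ PySem.Int.mod (x * d) pmod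
             then some (PySem.Int.mod (x * d) pmod - pmod)
             else none : Option Int) with
      | some numer =>
          if d = 1 then PySem.Int.toStr numer
          else PySem.Int.toStr numer ++ "/" ++ PySem.Int.toStr d
      | none => fAltLoop x ds

def f_alt (x : Int) : String :=
  if x < 0 ∨ pmod ≤ x then "Not Found"
  else fAltLoop x (PySem.List.pyRange 1 1000 1)

-- ===== PRECONDITION & SPEC =====
def Spec_f (x : Int) (out : String) : Prop := out = f_alt x
instance (x : Int) (out : String) : Decidable (Spec_f x out) := by unfold Spec_f; infer_instance

-- ===== CLAIM (what is proved, stated in full; the proofs are below) =====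
def Claim_equal_f : Prop := ∀ (x : Int), Dom_f x → Spec_f x (f x)

-- ===== LEMMAS AND PROOFS =====

theorem pmod_pos : (0 : Int) < pmod := by norm_num [pmod]

-- the 999 inverse computations A performs, checked by the kernel
set_option maxRecDepth 10000 in
theorem inv_all :
    ((PySem.List.pyRange 1 1000 1).all (fun d =>
      let i := pymodinv d pmod
      decide (0 ≤ i) && decide (i < pmod) && (PySem.Int.mod (d * i) pmod == 1))) = true := by
  decide

theorem inv_facts (d : Int) (hd : 1 ≤ d) (hd2 : d < 1000) :
    0 ≤ pymodinv d pmod ∧ pymodinv d pmod < pmod ∧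
      (d * pymodinv d pmod) % pmod = 1 := by
  have hmem : d ∈ PySem.List.pyRange 1 1000 1 := (PySem.List.mem_pyRange_one).2 ⟨hd, hd2⟩
  have h := List.all_eq_true.mp inv_all d hmem
  simp only [Bool.and_eq_true, decide_eq_true_eq, beq_iff_eq,
    PySem.Int.mod_eq_emod_of_pos pmod_pos] at h
  exact ⟨h.1.1, h.1.2, h.2⟩

-- fInner is a find? over the numerator list
theorem fInner_eq_find (x inv d : Int) (l : List Int) :
    fInner x inv d l =
      (l.find? (fun n => x == PySem.Int.mod (n * inv) pmod)).map
        (fun n => if inv = 1 then PySem.Int.toStr n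
                  else PySem.Int.toStr n ++ "/" ++ PySem.Int.toStr d) := by
  induction l with
  | nil => rfl
  | cons n ns ih =>
      by_cases h : x = PySem.Int.mod (n * inv) pmod
      · simp [fInner, h]
      · simp [fInner, h, ih]

-- first match of a predicate with a unique satisfier
theorem find?_unique {q : Int → Bool} {l : List Int} {c : Int}
    (hm : c ∈ l) (hq : q c = true) (hu : ∀ b ∈ l, q b = true → b = c) :
    l.find? q = some c := by
  induction l with
  | nil => cases hm
  | cons a l ih =>
      rcases List.mem_cons.mp hm with rfl | hm'
      · exact List.find?_cons_of_pos hq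
      · by_cases ha : q a = true
        · have : a = c := hu a (List.mem_cons_self) ha
          subst this
          exact List.find?_cons_of_pos ha
        · rw [List.find?_cons_of_neg (by simpa using ha)]
          exact ih hm' (fun b hb hqb => hu b (List.mem_cons_of_mem _ hb) hqb)

-- the inner predicate holds iff numer ≡ x·d (mod p)  (given d·inv ≡ 1 and 0 ≤ x < p)
theorem pred_char (x inv d n : Int) (hx : 0 ≤ x) (hx2 : x < pmod)
    (hdi : (d * inv) % pmod = 1) :
    (x = (n * inv) % pmod) ↔ n % pmod = (x * d) % pmod := by
  have h1 : d * inv ≡ 1 [ZMOD pmod] := by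
    unfold Int.ModEq
    rw [hdi]
    rw [Int.emod_eq_of_lt (by norm_num) (by norm_num [pmod])]
  constructor
  · intro hxe
    have h2 : x * d ≡ (n * inv) * d [ZMOD pmod] := by
      rw [hxe]
      exact Int.ModEq.mul_right d (Int.emod_emod_of_dvd _ dvd_rfl)
    have h3 : (n * inv) * d ≡ n * 1 [ZMOD pmod] := by
      calc (n * inv) * d = n * (d * inv) := by ring
        _ ≡ n * 1 [ZMOD pmod] := Int.ModEq.mul_left n h1
    have := (h2.trans h3).symm
    simpa using this
  · intro hne
    have h2 : n * inv ≡ (x * d) * inv [ZMOD pmod] := Int.ModEq.mul_right inv hne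
    have h3 : (x * d) * inv ≡ x * 1 [ZMOD pmod] := by
      calc (x * d) * inv = x * (d * inv) := by ring
        _ ≡ x * 1 [ZMOD pmod] := Int.ModEq.mul_left x h1
    have h4 : (n * inv) % pmod = x % pmod := (h2.trans h3).trans (by simp)
    rw [h4, Int.emod_eq_of_lt hx hx2]

-- A's inner scan finds exactly B's candidate numerator
theorem inner_char (x d : Int) (hx : 0 ≤ x) (hx2 : x < pmod)
    (hd : 1 ≤ d) (hd2 : d < 1000) :
    fInner x (pymodinv d pmod) d (PySem.List.pyRange (-1000) 1000 1) =
      (if PySem.Int.mod (x * d) pmod < 1000 then some (PySem.Int.mod (x * d) pmod)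
       else if pmod - 1000 ≤ PySem.Int.mod (x * d) pmod
       then some (PySem.Int.mod (x * d) pmod - pmod)
       else none).map (fun n => if pymodinv d pmod = 1 then PySem.Int.toStr n
                                else PySem.Int.toStr n ++ "/" ++ PySem.Int.toStr d) := by
  obtain ⟨hi, hi2, hdi⟩ := inv_facts d hd hd2
  rw [fInner_eq_find]
  have hr' : PySem.Int.mod (x * d) pmod = (x * d) % pmod :=
    PySem.Int.mod_eq_emod_of_pos pmod_pos
  set r := PySem.Int.mod (x * d) pmod with hrdef
  have hr0 : 0 ≤ r := by rw [hr']; exact Int.emod_nonneg _ (by norm_num [pmod])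
  have hrlt : r < pmod := by rw [hr']; exact Int.emod_lt_of_pos _ pmod_pos
  have hpred : ∀ n : Int,
      ((fun n => x == PySem.Int.mod (n * (pymodinv d pmod)) pmod) n = true) ↔
        n % pmod = r := by
    intro n
    rw [hr']
    simp only [beq_iff_eq, PySem.Int.mod_eq_emod_of_pos pmod_pos]
    exact pred_char x (pymodinv d pmod) d n hx hx2 hdi
  have hwin : ∀ n : Int, -1000 ≤ n → n < 1000 →
      n % pmod = if 0 ≤ n then n else n + pmod := by
    intro n h1 h2
    unfold pmod
    split_ifs <;> omega
  by_cases hc1 : r < 1000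
  · rw [if_pos hc1]
    have hfind : (PySem.List.pyRange (-1000) 1000 1).find?
        (fun n => x == PySem.Int.mod (n * (pymodinv d pmod)) pmod) = some r := by
      apply find?_unique ((PySem.List.mem_pyRange_one).2 ⟨by omega, hc1⟩)
      · rw [hpred r, hwin r (by omega) hc1, if_pos hr0]
      · intro b hb hbq
        obtain ⟨hb1, hb2⟩ := (PySem.List.mem_pyRange_one).1 hb
        rw [hpred b, hwin b hb1 hb2] at hbq
        by_cases h0 : 0 ≤ b
        · rwa [if_pos h0] at hbq
        · rw [if_neg h0] at hbq
          unfold pmod at *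
          omega
    rw [hfind, Option.map_some]
  · by_cases hc2 : pmod - 1000 ≤ r
    · rw [if_neg hc1, if_pos hc2]
      have hfind : (PySem.List.pyRange (-1000) 1000 1).find?
          (fun n => x == PySem.Int.mod (n * (pymodinv d pmod)) pmod) = some (r - pmod) := by
        apply find?_unique
          ((PySem.List.mem_pyRange_one).2 ⟨by omega, by unfold pmod at *; omega⟩)
        · rw [hpred (r - pmod), hwin (r - pmod) (by omega) (by unfold pmod at *; omega),
              if_neg (by unfold pmod at *; omega)]
          omega
        · intro b hb hbq
          obtain ⟨hb1, hb2⟩ := (PySem.List.mem_pyRange_one).1 hb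
          rw [hpred b, hwin b hb1 hb2] at hbq
          by_cases h0 : 0 ≤ b
          · rw [if_pos h0] at hbq
            unfold pmod at *
            omega
          · rw [if_neg h0] at hbq
            omega
      rw [hfind, Option.map_some]
    · rw [if_neg hc1, if_neg hc2]
      have hnone : (PySem.List.pyRange (-1000) 1000 1).find?
          (fun n => x == PySem.Int.mod (n * (pymodinv d pmod)) pmod) = none := by
        rw [List.find?_eq_none]
        intro b hb
        obtain ⟨hb1, hb2⟩ := (PySem.List.mem_pyRange_one).1 hb
        intro hbq
        rw [hpred b, hwin b hb1 hb2] at hbq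
        by_cases h0 : 0 ≤ b
        · rw [if_pos h0] at hbq; omega
        · rw [if_neg h0] at hbq; omega
      rw [hnone, Option.map_none]

-- the inverse is 1 exactly for denominator 1
theorem inv_one_iff (d : Int) (hd : 1 ≤ d) (hd2 : d < 1000) :
    (pymodinv d pmod = 1) ↔ d = 1 := by
  obtain ⟨hi, hi2, hdi⟩ := inv_facts d hd hd2
  constructor
  · intro h
    rw [h, mul_one, Int.emod_eq_of_lt (by omega) (by unfold pmod at *; omega)] at hdi
    omega
  · intro h
    subst h
    rw [one_mul, Int.emod_eq_of_lt hi hi2] at hdi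
    exact hdi

-- the two loops agree for x in [0, p)
theorem loops_eq (x : Int) (hx : 0 ≤ x) (hx2 : x < pmod) (l : List Int)
    (hl : ∀ d ∈ l, 1 ≤ d ∧ d < 1000) :
    fOuter x l = fAltLoop x l := by
  induction l with
  | nil => rfl
  | cons d ds ih =>
      obtain ⟨hd, hd2⟩ := hl d (List.mem_cons_self)
      have hrec := ih (fun e he => hl e (List.mem_cons_of_mem _ he))
      unfold fOuter fAltLoop
      rw [inner_char x d hx hx2 hd hd2]
      by_cases hc1 : PySem.Int.mod (x * d) pmod < 1000
      · simp [hc1, inv_one_iff d hd hd2]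
      · by_cases hc2 : pmod - 1000 ≤ PySem.Int.mod (x * d) pmod
        · simp [hc1, hc2, inv_one_iff d hd hd2]
        · simp [hc1, hc2, hrec]

-- outside [0, p) A's predicate never fires
theorem fInner_none (x inv d : Int) (hx : ¬ (0 ≤ x ∧ x < pmod)) (l : List Int) :
    fInner x inv d l = none := by
  induction l with
  | nil => rfl
  | cons n ns ih =>
      unfold fInner
      rw [if_neg, ih]
      intro h
      exact hx ⟨h ▸ PySem.Int.mod_nonneg _ pmod_pos, h ▸ PySem.Int.mod_lt _ pmod_pos⟩

theorem fOuter_notfound (x : Int) (hx : ¬ (0 ≤ x ∧ x < pmod)) (l : List Int) :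
    fOuter x l = "Not Found" := by
  induction l with
  | nil => rfl
  | cons d ds ih =>
      unfold fOuter
      rw [fInner_none x _ d hx, ih]

-- ===== VERDICT (by name: the statement is the Claim_ definition above) =====
theorem f_spec : Claim_equal_f := by
  intro x _
  unfold Spec_f f f_alt
  by_cases hx : 0 ≤ x ∧ x < pmod
  · rw [if_neg (by omega)]
    exact loops_eq x hx.1 hx.2 _ (fun d hd => (PySem.List.mem_pyRange_one).1 hd)
  · rw [if_pos (by omega), fOuter_notfound x hx]
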